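-- pv_equiv track=rewrite | github.com/Irreq/polyomino-contraction | shape.py | get_circumference
-- ===== SOURCE A (Python) =====
-- def get_width(shape):
--     return len(shape[0])
--
-- def get_height(shape):
--     return len(shape)
--
-- def get_nodes(shape):
--     polyomino = []
--     for y in range(get_height(shape)):
--         for x in range(get_width(shape)):
--             if shape[y][x] == 1:
--                 polyomino.append((x, y))
--     return polyomino
--
-- def get_circumference(shape):
--     polyomino = get_nodes(shape)
--
--     circumference = 0
--     for x, y in polyomino:
--         if (x+1, y) not in polyomino:
--             circumference += 1
--         if (x-1, y) not in polyomino: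
--             circumference += 1
--         if (x, y+1) not in polyomino:
--             circumference += 1
--         if (x, y-1) not in polyomino:
--             circumference += 1
--
--     return circumference
-- ===== SOURCE B (Python) =====
-- def get_circumference(shape):
--     circumference = 0
--     for y in range(len(shape)):
--         width = len(shape[0])
--         for x in range(width):
--             if shape[y][x] == 1:
--                 n = 0
--                 if x + 1 < width and shape[y][x + 1] == 1:
--                     n += 1
--                 if x - 1 >= 0 and shape[y][x - 1] == 1:
--                     n += 1
--                 if y + 1 < len(shape) and shape[y + 1][x] == 1:
--                     n += 1
--                 if y - 1 >= 0 and shape[y - 1][x] == 1: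
--                     n += 1
--                 circumference += 4 - n
--     return circumference
-- ===== Notes on version B (the rewrite author's own statement) =====
-- stated objective: alternative
-- what changed: B drops the intermediate node list and its linear membership scans: one pass over the grid counts each 1-cell's live neighbours by direct indexing, adding 4 minus that count.
-- outside the precondition, e.g. on get_circumference([[1, 1], [1]]): A raises IndexError, B raises IndexError
import Mathlib
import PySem

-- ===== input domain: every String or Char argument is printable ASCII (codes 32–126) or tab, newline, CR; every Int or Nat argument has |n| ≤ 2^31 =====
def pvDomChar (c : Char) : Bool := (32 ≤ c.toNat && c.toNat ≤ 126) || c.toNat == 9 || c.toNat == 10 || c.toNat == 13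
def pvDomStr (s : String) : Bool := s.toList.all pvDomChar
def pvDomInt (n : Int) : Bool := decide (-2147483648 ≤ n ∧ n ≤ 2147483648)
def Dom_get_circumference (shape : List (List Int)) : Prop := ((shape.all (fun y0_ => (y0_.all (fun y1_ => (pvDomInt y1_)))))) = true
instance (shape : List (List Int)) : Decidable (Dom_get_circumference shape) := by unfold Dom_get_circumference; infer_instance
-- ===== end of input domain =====

-- B replaces A's node list and its linear membership scans by a single grid pass with direct
-- neighbour indexing (adds 4 minus the live-neighbour count per 1-cell).

-- ===== PORT A =====
def pvWidthA (shape : List (List Int)) : Int := ((PySem.List.pyGetD shape 0 []).length : Int)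

def pvCellA (shape : List (List Int)) (y x : Int) : Int :=
  PySem.List.pyGetD (PySem.List.pyGetD shape y []) x 0

def pvNodesA (shape : List (List Int)) : List (Int × Int) :=
  (PySem.List.pyRange 0 (shape.length : Int) 1).foldl (fun acc y =>
    (PySem.List.pyRange 0 (pvWidthA shape) 1).foldl (fun acc x =>
      if pvCellA shape y x == 1 then acc ++ [(x, y)] else acc) acc) []

def get_circumference (shape : List (List Int)) : Int :=
  (pvNodesA shape).foldl (fun c p =>
    let c1 := if (p.1 + 1, p.2) ∈ pvNodesA shape then c else c + 1
    let c2 := if (p.1 - 1, p.2) ∈ pvNodesA shape then c1 else c1 + 1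
    let c3 := if (p.1, p.2 + 1) ∈ pvNodesA shape then c2 else c2 + 1
    if (p.1, p.2 - 1) ∈ pvNodesA shape then c3 else c3 + 1) 0

-- ===== PORT B =====
def pvCellB (shape : List (List Int)) (y x : Int) : Int :=
  PySem.List.pyGetD (PySem.List.pyGetD shape y []) x 0

def get_circumference_alt (shape : List (List Int)) : Int :=
  (PySem.List.pyRange 0 (shape.length : Int) 1).foldl (fun c y =>
    let width : Int := ((PySem.List.pyGetD shape 0 []).length : Int)
    (PySem.List.pyRange 0 width 1).foldl (fun c x =>
      if pvCellB shape y x == 1 then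
        c + (4 - ((if x + 1 < width ∧ pvCellB shape y (x + 1) == 1 then (1 : Int) else 0) +
                  (if 0 ≤ x - 1 ∧ pvCellB shape y (x - 1) == 1 then (1 : Int) else 0) +
                  (if y + 1 < (shape.length : Int) ∧ pvCellB shape (y + 1) x == 1 then (1 : Int) else 0) +
                  (if 0 ≤ y - 1 ∧ pvCellB shape (y - 1) x == 1 then (1 : Int) else 0)))
      else c) c) 0

-- ===== PRECONDITION & SPEC =====
-- Pre_ excludes ragged inputs on which a row is shorter than the first row: there the Python A
-- (and B) raise IndexError when indexing that row up to len(shape[0]).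
def Pre_get_circumference (shape : List (List Int)) : Prop :=
  ∀ row ∈ shape, (PySem.List.pyGetD shape 0 ([] : List Int)).length ≤ row.length
instance (shape : List (List Int)) : Decidable (Pre_get_circumference shape) := by
  unfold Pre_get_circumference; infer_instance

def pvWitness_get_circumference : List (List Int) := [[1, 0], [0, 1]]

def Spec_get_circumference (shape : List (List Int)) (out : Int) : Prop := out = get_circumference_alt shape
instance (shape : List (List Int)) (out : Int) : Decidable (Spec_get_circumference shape out) := by unfold Spec_get_circumference; infer_instance

-- ===== CLAIM (what is proved, stated in full; the proofs are below) =====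
def Claim_equal_get_circumference : Prop := ∀ (shape : List (List Int)), Dom_get_circumference shape → Pre_get_circumference shape → Spec_get_circumference shape (get_circumference shape)

-- ===== LEMMAS AND PROOFS =====

-- per-node contribution A's loop body adds
def pvContribA (shape : List (List Int)) (p : Int × Int) : Int :=
  (if (p.1 + 1, p.2) ∈ pvNodesA shape then 0 else 1) +
  (if (p.1 - 1, p.2) ∈ pvNodesA shape then 0 else 1) +
  (if (p.1, p.2 + 1) ∈ pvNodesA shape then 0 else 1) +
  (if (p.1, p.2 - 1) ∈ pvNodesA shape then 0 else 1)

-- per-cell contribution of B's inner loop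
def pvContribB (shape : List (List Int)) (y x : Int) : Int :=
  if pvCellB shape y x == 1 then
    4 - ((if x + 1 < pvWidthA shape ∧ pvCellB shape y (x + 1) == 1 then (1 : Int) else 0) +
         (if 0 ≤ x - 1 ∧ pvCellB shape y (x - 1) == 1 then (1 : Int) else 0) +
         (if y + 1 < (shape.length : Int) ∧ pvCellB shape (y + 1) x == 1 then (1 : Int) else 0) +
         (if 0 ≤ y - 1 ∧ pvCellB shape (y - 1) x == 1 then (1 : Int) else 0))
  else 0

theorem pvNodesA_eq (shape : List (List Int)) :
    pvNodesA shape =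
      (PySem.List.pyRange 0 (shape.length : Int) 1).flatMap (fun y =>
        ((PySem.List.pyRange 0 (pvWidthA shape) 1).filter
            (fun x => pvCellA shape y x == 1)).map (fun x => (x, y))) := by
  unfold pvNodesA
  simp only [PySem.List.foldl_append_if]
  rw [PySem.List.foldl_append_eq_flatMap]
  simp

theorem pv_mem_nodesA (shape : List (List Int)) (u v : Int) :
    ((u, v) ∈ pvNodesA shape) ↔
      (0 ≤ v ∧ v < (shape.length : Int) ∧ 0 ≤ u ∧ u < pvWidthA shape ∧ pvCellA shape v u == 1) := by
  rw [pvNodesA_eq]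
  simp only [List.mem_flatMap, List.mem_map, List.mem_filter, PySem.List.mem_pyRange_one]
  constructor
  · rintro ⟨y, ⟨hy0, hyh⟩, x, ⟨⟨hx0, hxw⟩, hc⟩, hpx⟩
    obtain ⟨rfl, rfl⟩ : x = u ∧ y = v := by
      constructor <;> [exact congrArg Prod.fst hpx; exact congrArg Prod.snd hpx]
    exact ⟨hy0, hyh, hx0, hxw, hc⟩
  · rintro ⟨hv0, hvh, hu0, huw, hc⟩
    exact ⟨v, ⟨hv0, hvh⟩, u, ⟨⟨hu0, huw⟩, hc⟩, rfl⟩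

theorem pvA_eq_sum (shape : List (List Int)) :
    get_circumference shape = ((pvNodesA shape).map (pvContribA shape)).sum := by
  unfold get_circumference
  rw [PySem.List.foldl_congr_mem _ _ (fun c p => c + pvContribA shape p) 0 ?_,
      PySem.List.foldl_add, zero_add]
  intro c p _
  simp only [pvContribA]
  split_ifs <;> ring

theorem pvB_eq_sum (shape : List (List Int)) :
    get_circumference_alt shape =
      ((PySem.List.pyRange 0 (shape.length : Int) 1).map (fun y =>
        ((PySem.List.pyRange 0 (pvWidthA shape) 1).map (pvContribB shape y)).sum)).sum := by
  unfold get_circumference_alt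
  have hinner : ∀ (c y : Int),
      (PySem.List.pyRange 0 (pvWidthA shape) 1).foldl (fun c x =>
        if pvCellB shape y x == 1 then
          c + (4 - ((if x + 1 < pvWidthA shape ∧ pvCellB shape y (x + 1) == 1 then (1 : Int) else 0) +
                    (if 0 ≤ x - 1 ∧ pvCellB shape y (x - 1) == 1 then (1 : Int) else 0) +
                    (if y + 1 < (shape.length : Int) ∧ pvCellB shape (y + 1) x == 1 then (1 : Int) else 0) +
                    (if 0 ≤ y - 1 ∧ pvCellB shape (y - 1) x == 1 then (1 : Int) else 0)))
        else c) c
      = c + ((PySem.List.pyRange 0 (pvWidthA shape) 1).map (pvContribB shape y)).sum := by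
    intro c y
    rw [PySem.List.foldl_congr_mem _ _ (fun c x => c + pvContribB shape y x) c ?_,
        PySem.List.foldl_add]
    intro acc x _
    simp only [pvContribB]
    split_ifs <;> ring
  refine Eq.trans (PySem.List.foldl_congr_mem _ _
      (fun c y => c + ((PySem.List.pyRange 0 (pvWidthA shape) 1).map (pvContribB shape y)).sum) 0
      (fun c y _ => hinner c y)) ?_
  rw [PySem.List.foldl_add, zero_add]

theorem pv_sum_flatMap (l : List Int) (f : Int → List Int) :
    (l.flatMap f).sum = (l.map (fun a => (f a).sum)).sum := by
  induction l with
  | nil => simp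
  | cons a l ih => simp [List.flatMap_cons, ih]

theorem pv_sum_map_filter (l : List Int) (p : Int → Bool) (g : Int → Int) :
    ((l.filter p).map g).sum = (l.map (fun x => if p x then g x else 0)).sum := by
  induction l with
  | nil => simp
  | cons a l ih =>
    by_cases h : p a = true <;> simp [h, ih]

theorem pv_ports_eq (shape : List (List Int)) :
    get_circumference shape = get_circumference_alt shape := by
  rw [pvA_eq_sum, pvB_eq_sum, pvNodesA_eq]
  rw [List.map_flatMap, pv_sum_flatMap]
  apply congrArg
  apply List.map_congr_left
  intro y hy
  rw [PySem.List.mem_pyRange_one] at hy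
  obtain ⟨hy0, hyh⟩ := hy
  rw [List.map_map, pv_sum_map_filter]
  apply congrArg
  apply List.map_congr_left
  intro x hx
  rw [PySem.List.mem_pyRange_one] at hx
  obtain ⟨hx0, hxw⟩ := hx
  have hx1 : (0 : Int) ≤ x + 1 := by omega
  have hy1 : (0 : Int) ≤ y + 1 := by omega
  have hxw' : x - 1 < pvWidthA shape := by omega
  have hyh' : y - 1 < (shape.length : Int) := by omega
  by_cases hc : pvCellA shape y x == 1
  · simp only [Function.comp, hc, if_pos, pvContribA, pvContribB]
    have hcB : pvCellB shape y x == 1 := hc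
    simp only [hcB, if_pos]
    have d1 : ((x + 1, y) ∈ pvNodesA shape) ↔ (x + 1 < pvWidthA shape ∧ pvCellB shape y (x + 1) == 1) := by
      rw [pv_mem_nodesA]; constructor
      · rintro ⟨_, _, _, h1, h2⟩; exact ⟨h1, h2⟩
      · rintro ⟨h1, h2⟩; exact ⟨hy0, hyh, hx1, h1, h2⟩
    have d2 : ((x - 1, y) ∈ pvNodesA shape) ↔ (0 ≤ x - 1 ∧ pvCellB shape y (x - 1) == 1) := by
      rw [pv_mem_nodesA]; constructor
      · rintro ⟨_, _, h1, _, h2⟩; exact ⟨h1, h2⟩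
      · rintro ⟨h1, h2⟩; exact ⟨hy0, hyh, h1, hxw', h2⟩
    have d3 : ((x, y + 1) ∈ pvNodesA shape) ↔ (y + 1 < (shape.length : Int) ∧ pvCellB shape (y + 1) x == 1) := by
      rw [pv_mem_nodesA]; constructor
      · rintro ⟨_, h1, _, _, h2⟩; exact ⟨h1, h2⟩
      · rintro ⟨h1, h2⟩; exact ⟨hy1, h1, hx0, hxw, h2⟩
    have d4 : ((x, y - 1) ∈ pvNodesA shape) ↔ (0 ≤ y - 1 ∧ pvCellB shape (y - 1) x == 1) := by
      rw [pv_mem_nodesA]; constructor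
      · rintro ⟨h1, _, _, _, h2⟩; exact ⟨h1, h2⟩
      · rintro ⟨h1, h2⟩; exact ⟨h1, hyh', hx0, hxw, h2⟩
    simp only [d1, d2, d3, d4]
    split_ifs <;> norm_num
  · have hcB : ¬((pvCellB shape y x == 1) = true) := hc
    simp [pvContribB, hc, hcB]

-- ===== VERDICT (by name: the statement is the Claim_ definition above) =====
theorem get_circumference_spec : Claim_equal_get_circumference := by
  intro shape _ _
  unfold Spec_get_circumference
  exact pv_ports_eq shape
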